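-- pv_equiv track=rewrite | github.com/ArletteOsuna/NewEnglandAirportData | Homework/papers.py | processtitle
-- ===== SOURCE A (Python) =====
-- def processtitle(title):
--     result = []
--     capitalize_next = True
--
--     for i, char in enumerate(title):
--         if capitalize_next and char.isalpha():
--             result.append(char.upper())  # Capitalize alphabetic characters
--             capitalize_next = False
--         else:
--             result.append(char.lower())
--
--         if char in ":?":
--             result.append(' ')
--             capitalize_next = True
--
--     return ''.join(result).replace('  ', ' ')
-- ===== SOURCE B (Python) =====
-- def _cap(seg):
--     # lowercase the segment, uppercasing only its first alphabetic character
--     i, n = 0, len(seg)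
--     while i < n and not seg[i].isalpha():
--         i += 1
--     if i == n:
--         return seg.lower()
--     return seg[:i].lower() + seg[i].upper() + seg[i + 1:].lower()
--
--
-- def processtitle(title):
--     pieces = []
--     seg = []
--     for c in title:
--         if c in ':?':
--             pieces.append(_cap(''.join(seg)))
--             pieces.append(c + ' ')
--             seg = []
--         else:
--             seg.append(c)
--     pieces.append(_cap(''.join(seg)))
--     return ''.join(pieces).replace('  ', ' ')
-- ===== Notes on version B (the rewrite author's own statement) =====
-- stated objective: faster
-- what changed: Replaces A's single character loop with a cross-character capitalize_next flag by a split-into-segments pass: the title is cut at the two delimiter characters and each segment is capitalized independently by locating its first alphabetic character and rebuilding it from bulk-lowered slices.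
import Mathlib
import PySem

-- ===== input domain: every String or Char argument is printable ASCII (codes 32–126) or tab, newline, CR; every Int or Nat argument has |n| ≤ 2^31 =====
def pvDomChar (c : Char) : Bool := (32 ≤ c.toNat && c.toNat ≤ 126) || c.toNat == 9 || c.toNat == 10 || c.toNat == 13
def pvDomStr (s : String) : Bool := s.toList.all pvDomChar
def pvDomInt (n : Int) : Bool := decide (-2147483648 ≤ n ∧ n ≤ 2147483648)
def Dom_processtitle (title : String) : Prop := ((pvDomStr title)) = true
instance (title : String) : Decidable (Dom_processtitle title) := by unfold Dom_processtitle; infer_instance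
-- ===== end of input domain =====

-- B re-decomposes A's stateful loop as: split at the delimiters, capitalize each segment independently from bulk-lowered slices; measured constant-factor speedup in Python.

-- ===== PORT A =====
def processtitleStep (st : List Char × Bool) (ic : Int × Char) : List Char × Bool :=
  let c := ic.2
  let r : List Char × Bool :=
    if st.2 && PySem.Chars.isalpha c then (st.1 ++ [PySem.Chars.upperChar c], false)
    else (st.1 ++ [PySem.Chars.lowerChar c], st.2)
  if [':', '?'].contains c then (r.1 ++ [' '], true) else r

def processtitle (title : String) : String :=
  let st := (PySem.List.enumerate title.toList 0).foldl processtitleStep ([], true)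
  PySem.Str.replace (String.mk st.1) "  " " "

-- ===== PORT B =====
-- while i < n and not seg[i].isalpha(): i += 1
def capScan (seg : List Char) (i : Nat) : Nat :=
  if h : i < seg.length then
    if PySem.Chars.isalpha seg[i] then i else capScan seg (i + 1)
  else i
termination_by seg.length - i

def capB (seg : List Char) : List Char :=
  let i := capScan seg 0
  if i = seg.length then PySem.Chars.lower seg
  else
    -- seg[:i].lower() + seg[i].upper() + seg[i+1:].lower(); i < len seg here, so getD's default is unreachable
    PySem.Chars.lower (PySem.List.slice seg none (some (i : Int))) ++
      [PySem.Chars.upperChar (seg.getD i ' ')] ++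
      PySem.Chars.lower (PySem.List.slice seg (some ((i : Int) + 1)) none)

def processtitleAltStep (st : List (List Char) × List Char) (c : Char) : List (List Char) × List Char :=
  if [':', '?'].contains c then (st.1 ++ [capB st.2, [c, ' ']], [])
  else (st.1, st.2 ++ [c])

def processtitle_alt (title : String) : String :=
  let st := title.toList.foldl processtitleAltStep ([], [])
  PySem.Str.replace (String.mk (st.1 ++ [capB st.2]).flatten) "  " " "

-- ===== PRECONDITION & SPEC =====
def Spec_processtitle (title : String) (out : String) : Prop := out = processtitle_alt title
instance (title : String) (out : String) : Decidable (Spec_processtitle title out) := by unfold Spec_processtitle; infer_instance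

-- ===== CLAIM (what is proved, stated in full; the proofs are below) =====
def Claim_equal_processtitle : Prop := ∀ (title : String), Dom_processtitle title → Spec_processtitle title (processtitle title)

-- ===== LEMMAS AND PROOFS =====

-- A's loop as structural recursion
def fA : List Char → Bool → List Char
  | [], _ => []
  | c :: cs, b =>
    if [':', '?'].contains c then
      (if b && PySem.Chars.isalpha c then PySem.Chars.upperChar c else PySem.Chars.lowerChar c)
        :: ' ' :: fA cs true
    else if b && PySem.Chars.isalpha c then PySem.Chars.upperChar c :: fA cs false
    else PySem.Chars.lowerChar c :: fA cs b

theorem foldA (l : List (Int × Char)) (acc : List Char) (b : Bool) :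
    (l.foldl processtitleStep (acc, b)).1 = acc ++ fA (l.map (·.2)) b := by
  induction l generalizing acc b with
  | nil => simp [fA]
  | cons p l ih =>
    obtain ⟨i, c⟩ := p
    simp only [List.foldl_cons, List.map_cons, processtitleStep]
    by_cases hd : c = ':' ∨ c = '?' <;> by_cases hb : (b && PySem.Chars.isalpha c) = true <;>
      simp [fA, hd, hb, ih]

-- first-alpha capitalization as structural recursion
def capCore : List Char → Bool → List Char
  | [], _ => []
  | c :: cs, d =>
    if !d && PySem.Chars.isalpha c then PySem.Chars.upperChar c :: capCore cs true
    else PySem.Chars.lowerChar c :: capCore cs d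

theorem capCore_no_alpha (xs : List Char) (d : Bool)
    (h : ∀ x ∈ xs, PySem.Chars.isalpha x = false) : capCore xs d = xs.map PySem.Chars.lowerChar := by
  induction xs generalizing d with
  | nil => simp [capCore]
  | cons c cs ih =>
    have hc := h c (by simp)
    simp [capCore, hc, ih _ (fun x hx => h x (by simp [hx]))]

theorem capCore_true (xs : List Char) : capCore xs true = xs.map PySem.Chars.lowerChar := by
  induction xs with
  | nil => simp [capCore]
  | cons c cs ih => simp [capCore, ih]

theorem capCore_append (xs ys : List Char) (d : Bool) :
    capCore (xs ++ ys) d = capCore xs d ++ capCore ys (d || xs.any PySem.Chars.isalpha) := by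
  induction xs generalizing d with
  | nil => simp [capCore]
  | cons c cs ih =>
    by_cases hc : PySem.Chars.isalpha c = true <;> cases d <;>
      simp [capCore, hc, ih]

theorem lower_eq_map (xs : List Char) : PySem.Chars.lower xs = xs.map PySem.Chars.lowerChar := by
  simp [PySem.Chars.lower]

theorem capScan_eq (seg : List Char) (i : Nat) :
    capScan seg i = i + (seg.drop i).findIdx PySem.Chars.isalpha := by
  rw [capScan]
  by_cases h : i < seg.length
  · have hdrop : seg.drop i = seg[i] :: seg.drop (i + 1) := List.drop_eq_getElem_cons h
    rw [hdrop, List.findIdx_cons]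
    by_cases ha : PySem.Chars.isalpha seg[i] = true
    · rw [dif_pos h, if_pos ha, ha]
      simp
    · have hrec := capScan_eq seg (i + 1)
      rw [dif_pos h, if_neg ha, hrec]
      have ha' : PySem.Chars.isalpha seg[i] = false := by simpa using ha
      rw [ha']
      simp
      omega
  · have hd : seg.drop i = [] := List.drop_eq_nil_of_le (by omega)
    rw [dif_neg h, hd]
    simp
termination_by seg.length - i

theorem capB_eq (seg : List Char) : capB seg = capCore seg false := by
  unfold capB
  rw [capScan_eq]
  simp only [List.drop_zero, Nat.zero_add]
  set k := seg.findIdx PySem.Chars.isalpha with hk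
  by_cases hlen : k = seg.length
  · have hall : ∀ x ∈ seg, PySem.Chars.isalpha x = false := List.findIdx_eq_length.mp hlen
    simp [hlen, capCore_no_alpha seg false hall, lower_eq_map]
  · have hlt : k < seg.length := lt_of_le_of_ne List.findIdx_le_length hlen
    have halpha : PySem.Chars.isalpha seg[k] = true := List.findIdx_getElem (w := hlt)
    have hpre : ∀ x ∈ seg.take k, PySem.Chars.isalpha x = false := by
      intro x hx
      obtain ⟨j, hj, rfl⟩ := List.getElem_of_mem hx
      have hjk : j < k := by
        have := hj; simp only [List.length_take] at this; omega
      have hnot := List.not_of_lt_findIdx (p := PySem.Chars.isalpha) (xs := seg) (i := j)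
        (by omega)
      simpa [List.getElem_take] using hnot
    have hsplit : seg = seg.take k ++ seg[k] :: seg.drop (k + 1) := by
      conv_lhs => rw [← List.take_append_drop k seg]
      rw [List.drop_eq_getElem_cons hlt]
    have hslice1 : PySem.List.slice seg none (some (k : Int)) = seg.take k :=
      PySem.List.slice_to_natCast seg k
    have hslice2 : PySem.List.slice seg (some ((k : Int) + 1)) none = seg.drop (k + 1) := by
      have h1 : ((k : Int) + 1) = ((k + 1 : Nat) : Int) := by push_cast; ring
      rw [h1, PySem.List.slice_from_natCast]
    rw [if_neg hlen, hslice1, hslice2]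
    conv_rhs => rw [hsplit]
    rw [capCore_append]
    have hany : (seg.take k).any PySem.Chars.isalpha = false := by
      simp only [List.any_eq_false]
      intro x hx; simpa using hpre x hx
    rw [capCore_no_alpha _ _ hpre, hany]
    simp [capCore, halpha, capCore_true, lower_eq_map, List.getElem?_eq_getElem hlt]

-- B's loop as structural recursion (already normalised through capCore)
def gB : List Char → List Char → List Char
  | [], seg => capCore seg false
  | c :: cs, seg =>
    if [':', '?'].contains c then capCore seg false ++ c :: ' ' :: gB cs []
    else gB cs (seg ++ [c])

theorem foldB (cs : List Char) (pieces : List (List Char)) (seg : List Char) :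
    (((cs.foldl processtitleAltStep (pieces, seg)).1 ++
        [capB (cs.foldl processtitleAltStep (pieces, seg)).2]).flatten)
      = pieces.flatten ++ gB cs seg := by
  induction cs generalizing pieces seg with
  | nil => simp [gB, capB_eq]
  | cons c cs ih =>
    by_cases hd : c = ':' ∨ c = '?'
    · rw [List.foldl_cons,
        show processtitleAltStep (pieces, seg) c = (pieces ++ [capB seg, [c, ' ']], []) from by
          simp [processtitleAltStep, hd],
        ih]
      simp [gB, hd, capB_eq]
    · rw [List.foldl_cons,
        show processtitleAltStep (pieces, seg) c = (pieces, seg ++ [c]) from by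
          simp [processtitleAltStep, hd],
        ih]
      simp [gB, hd]

theorem delim_facts (c : Char) (h : c = ':' ∨ c = '?') :
    PySem.Chars.isalpha c = false ∧ PySem.Chars.lowerChar c = c := by
  rcases h with rfl | rfl
  · exact ⟨by decide, by decide⟩
  · exact ⟨by decide, by decide⟩

theorem gB_eq (cs : List Char) : ∀ seg : List Char,
    gB cs seg = capCore seg false ++ fA cs (!(seg.any PySem.Chars.isalpha)) := by
  induction cs with
  | nil => intro seg; simp [gB, fA]
  | cons c cs ih =>
    intro seg
    by_cases hd : c = ':' ∨ c = '?'
    · obtain ⟨ha, hl⟩ := delim_facts c hd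
      simp [gB, fA, hd, ha, hl, ih, capCore]
    · by_cases hc : PySem.Chars.isalpha c = true <;> cases hseg : seg.any PySem.Chars.isalpha <;>
        simp [gB, fA, hd, hc, ih, capCore_append, hseg, capCore]

-- ===== VERDICT (by name: the statement is the Claim_ definition above) =====
theorem processtitle_spec : Claim_equal_processtitle := by
  intro title _
  unfold Spec_processtitle processtitle processtitle_alt
  simp only [foldA, foldB, PySem.List.map_snd_enumerate, List.flatten_nil, List.nil_append,
    gB_eq, List.any_nil, Bool.not_false]
  simp [capCore]
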